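-- pv_equiv track=rewrite | github.com/whitem4rk/2023-algorithm-study | LEVEL 3/stararr.py | solution
-- ===== SOURCE A (Python) =====
-- from collections import Counter
--
-- def solution(a):
--     elements = Counter(a)
--     answer = -1
--
--     for k in elements.keys():
--         if elements[k] <= answer:
--             continue
--         common_cnt = 0
--         idx = 0
--         while idx < len(a)-1:
--             if (a[idx] != k and a[idx+1] != k) \
--                 or (a[idx] == a[idx+1]):
--                 idx += 1
--                 continue
--             common_cnt += 1
--             idx += 2
--         answer = max(common_cnt, answer)
--
--     if answer == -1:
--         return 0
--     else:
--         return answer * 2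
-- ===== SOURCE B (Python) =====
-- def solution(a):
--     cnt = {}
--     last = {}
--     for i, (x, y) in enumerate(zip(a, a[1:])):
--         if x == y:
--             continue
--         for k in (x, y):
--             if i > last.get(k, -1):
--                 cnt[k] = cnt.get(k, 0) + 1
--                 last[k] = i + 1
--     return 2 * max(cnt.values(), default=0)
-- ===== Notes on version B (the rewrite author's own statement) =====
-- stated objective: alternative
-- what changed: Instead of re-running a greedy scan of the whole array once per distinct value, B makes a single pass over the adjacent pairs, maintaining per-key greedy pair counts and last-used positions in dictionaries, then takes the max of the counts.
import Mathlib
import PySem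

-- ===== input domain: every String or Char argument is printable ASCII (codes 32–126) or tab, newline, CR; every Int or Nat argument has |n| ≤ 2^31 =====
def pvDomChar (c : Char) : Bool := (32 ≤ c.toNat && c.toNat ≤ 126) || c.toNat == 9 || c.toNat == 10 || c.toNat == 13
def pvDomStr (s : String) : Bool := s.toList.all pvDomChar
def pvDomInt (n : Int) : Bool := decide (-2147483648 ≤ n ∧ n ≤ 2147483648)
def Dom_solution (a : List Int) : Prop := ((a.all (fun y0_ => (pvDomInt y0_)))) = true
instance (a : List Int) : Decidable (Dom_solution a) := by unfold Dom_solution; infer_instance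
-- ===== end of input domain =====

-- B replaces A's per-distinct-value rescan of the whole array by a single pass over adjacent
-- pairs, maintaining per-key greedy pair counts and last-used positions in dictionaries.


-- ===== PORT A =====
-- the inner `while idx < len(a)-1` loop of A, for key k (Python's idx stays ≥ 0, so idx : Nat)
def solWhile (a : List Int) (k : Int) (idx : Nat) (commonCnt : Int) : Int :=
  if _h : idx + 1 < a.length then
    if (PySem.List.pyGetD a idx 0 ≠ k ∧ PySem.List.pyGetD a (idx + 1) 0 ≠ k)
        ∨ PySem.List.pyGetD a idx 0 = PySem.List.pyGetD a (idx + 1) 0 then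
      solWhile a k (idx + 1) commonCnt
    else
      solWhile a k (idx + 2) (commonCnt + 1)
  else commonCnt
termination_by a.length - idx

def solution (a : List Int) : Int :=
  let elements := PySem.Dict.counter a
  let answer : Int := elements.keys.foldl (fun answer k =>
    if elements.getD k 0 ≤ answer then answer
    else max (solWhile a k 0 0) answer) (-1)
  if answer = -1 then 0 else answer * 2

-- ===== PORT B =====
-- body of `for k in (x, y): …` in Source B
def altInner (i : Int) (st : PySem.Dict Int Int × PySem.Dict Int Int) (k : Int) :
    PySem.Dict Int Int × PySem.Dict Int Int :=
  if i > st.2.getD k (-1) then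
    (st.1.insert k (st.1.getD k 0 + 1), st.2.insert k (i + 1))
  else st

-- body of `for i, (x, y) in enumerate(zip(a, a[1:])): …` in Source B
def altStep (st : PySem.Dict Int Int × PySem.Dict Int Int) (p : Int × (Int × Int)) :
    PySem.Dict Int Int × PySem.Dict Int Int :=
  if p.2.1 = p.2.2 then st
  else [p.2.1, p.2.2].foldl (altInner p.1) st

def solution_alt (a : List Int) : Int :=
  let st := (PySem.List.enumerate (a.zip (PySem.List.slice a (some 1) none)) 0).foldl
    altStep (PySem.Dict.empty, PySem.Dict.empty)
  2 * ((PySem.List.max? st.1.values (fun v => v)).getD 0)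

-- ===== PRECONDITION & SPEC =====
def Spec_solution (a : List Int) (out : Int) : Prop := out = solution_alt a
instance (a : List Int) (out : Int) : Decidable (Spec_solution a out) := by unfold Spec_solution; infer_instance

-- ===== CLAIM (what is proved, stated in full; the proofs are below) =====
def Claim_equal_solution : Prop := ∀ (a : List Int), Dom_solution a → Spec_solution a (solution a)

-- ===== LEMMAS AND PROOFS =====

-- A's greedy count for key k, as structural recursion on the list
def g (k : Int) : List Int → Int
  | x :: y :: rest =>
    if (x ≠ k ∧ y ≠ k) ∨ x = y then g k (y :: rest) else 1 + g k rest
  | _ => 0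

-- the same greedy as a DFA over the stream of adjacent pairs; b = "previous pair was taken"
def f (k : Int) : List (Int × Int) → Bool → Int
  | [], _ => 0
  | (x, y) :: r, b =>
    if b then f k r false
    else if (x = k ∨ y = k) ∧ x ≠ y then 1 + f k r true else f k r false

theorem g_short (k : Int) (l : List Int) (h : l.length ≤ 1) : g k l = 0 := by
  match l, h with
  | [], _ => rfl
  | [x], _ => rfl

theorem g_nonneg (k : Int) (l : List Int) : 0 ≤ g k l := by
  fun_induction g k l <;> simp_all <;> omega

theorem g_le_count (k : Int) (l : List Int) : g k l ≤ (l.count k : Int) := by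
  fun_induction g k l with
  | case1 x y rest h ih =>
    have hc : List.count k (y :: rest) ≤ List.count k (x :: y :: rest) := by
      simp only [List.count_cons]; omega
    exact ih.trans (by exact_mod_cast hc)
  | case2 x y rest h ih =>
    have hk : x = k ∨ y = k := by
      by_contra hc; push_neg at hc
      exact h (Or.inl ⟨fun e => hc.1 e, fun e => hc.2 e⟩)
    have hc : rest.count k + 1 ≤ List.count k (x :: y :: rest) := by
      simp only [List.count_cons]
      rcases hk with hx | hy
      · have hb : (x == k) = true := by simp [hx]
        simp [hb]
      · have hb : (y == k) = true := by simp [hy]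
        simp [hb]
    have := ih; push_cast at *; omega
  | case3 l h => positivity

theorem solWhile_eq_g (a : List Int) (k : Int) (idx : Nat) (c : Int) :
    solWhile a k idx c = c + g k (a.drop idx) := by
  fun_induction solWhile a k idx c with
  | case1 idx c h hc ih =>
    have h0 : idx < a.length := by omega
    have e1 : (↑idx + 1 : Int) = ((idx + 1 : Nat) : Int) := by push_cast; ring
    rw [PySem.List.pyGetD_natCast, e1, PySem.List.pyGetD_natCast,
        List.getD_eq_getElem a 0 h0, List.getD_eq_getElem a 0 h] at hc
    rw [List.drop_eq_getElem_cons h0, List.drop_eq_getElem_cons h, g, if_pos hc,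
        ← List.drop_eq_getElem_cons h]
    exact ih
  | case2 idx c h hc ih =>
    have h0 : idx < a.length := by omega
    have e1 : (↑idx + 1 : Int) = ((idx + 1 : Nat) : Int) := by push_cast; ring
    rw [PySem.List.pyGetD_natCast, e1, PySem.List.pyGetD_natCast,
        List.getD_eq_getElem a 0 h0, List.getD_eq_getElem a 0 h] at hc
    rw [List.drop_eq_getElem_cons h0, List.drop_eq_getElem_cons h, g, if_neg hc]
    rw [show idx + 1 + 1 = idx + 2 from rfl]
    omega
  | case3 idx c h =>
    rw [g_short k _ (by simp; omega)]
    ring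

theorem foldl_gmax_eq_map (a : List Int) (l : List Int) (c : Int) :
    l.foldl (fun ans k => max (g k a) ans) c = (l.map (fun k => g k a)).foldl max c := by
  induction l generalizing c with
  | nil => rfl
  | cons x t ih =>
    simp only [List.foldl_cons, List.map_cons]
    rw [ih, max_comm]

theorem solution_eq (a : List Int) :
    solution a = 2 * ((PySem.Set.ofList a : List Int).map (fun k => g k a)).foldl max 0 := by
  unfold solution
  simp only [PySem.Dict.keys_counter, PySem.Dict.getD_counter]
  rw [PySem.List.foldl_congr_mem _ _ (fun ans k => max (g k a) ans) (-1)
      (by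
        intro acc k _
        beta_reduce
        rw [solWhile_eq_g a k 0 0, List.drop_zero, zero_add]
        split
        · next hle =>
          have := (g_le_count k a).trans hle
          omega
        · rfl)]
  rw [foldl_gmax_eq_map]
  cases a with
  | nil => rfl
  | cons x t =>
    have hmem : x ∈ (PySem.Set.ofList (x :: t) : List Int) :=
      (PySem.Set.mem_ofList _ _).2 (by simp)
    obtain ⟨y, L, hL⟩ : ∃ y L, (PySem.Set.ofList (x :: t) : List Int).map (fun k => g k (x :: t)) = y :: L := by
      cases hS : (PySem.Set.ofList (x :: t) : List Int) with
      | nil => rw [hS] at hmem; cases hmem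
      | cons y L => exact ⟨_, _, rfl⟩
    rw [hL]
    have hy : 0 ≤ y := by
      have : y ∈ ((PySem.Set.ofList (x :: t) : List Int).map (fun k => g k (x :: t))) := by
        rw [hL]; simp
      obtain ⟨kk, _, hk⟩ := List.mem_map.1 this
      rw [← hk]; exact g_nonneg _ _
    simp only [List.foldl_cons]
    rw [show max (-1 : Int) y = y from by omega, show max (0 : Int) y = y from by omega]
    have hge : y ≤ List.foldl max y L := (PySem.List.le_foldl_max L y).1
    rw [if_neg (by omega)]
    ring

theorem f_true_tail (k y : Int) (rest : List Int) :
    f k ((y :: rest).zip rest) true = f k (rest.zip rest.tail) false := by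
  cases rest with
  | nil => rfl
  | cons z r => rfl

theorem g_eq_f (k : Int) (l : List Int) : g k l = f k (l.zip l.tail) false := by
  fun_induction g k l with
  | case1 x y rest h ih =>
    rw [List.tail_cons, List.zip_cons_cons, f]
    rw [if_neg (by simp only [Bool.false_eq_true]; exact fun e => e.elim)]
    rw [if_neg (by
      rcases h with ⟨hx, hy⟩ | he
      · rintro ⟨hk, -⟩; rcases hk with hk | hk
        · exact hx hk
        · exact hy hk
      · rintro ⟨-, hne⟩; exact hne he)]
    exact ih
  | case2 x y rest h ih =>
    rw [List.tail_cons, List.zip_cons_cons, f]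
    rw [if_neg (by simp only [Bool.false_eq_true]; exact fun e => e.elim)]
    rw [if_pos (by
      constructor
      · by_contra hc; push_neg at hc
        exact h (Or.inl ⟨hc.1, hc.2⟩)
      · intro he; exact h (Or.inr he))]
    rw [f_true_tail, ih]
  | case3 l h =>
    cases l with
    | nil => rfl
    | cons x t =>
      cases t with
      | nil => rfl
      | cons y r => exact (h x y r rfl).elim


theorem altInner_ne (i : Int) (st : PySem.Dict Int Int × PySem.Dict Int Int)
    (kk k' : Int) (h : k' ≠ kk) :
    (altInner i st kk).1.getD k' 0 = st.1.getD k' 0 ∧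
    (altInner i st kk).2.getD k' (-1) = st.2.getD k' (-1) := by
  rw [altInner]
  split
  · exact ⟨PySem.Dict.getD_insert_of_ne _ _ _ h, PySem.Dict.getD_insert_of_ne _ _ _ h⟩
  · exact ⟨rfl, rfl⟩

theorem altInner_self_pos (i : Int) (st : PySem.Dict Int Int × PySem.Dict Int Int)
    (kk : Int) (h : i > st.2.getD kk (-1)) :
    (altInner i st kk).1.getD kk 0 = st.1.getD kk 0 + 1 ∧
    (altInner i st kk).2.getD kk (-1) = i + 1 := by
  rw [altInner, if_pos h]
  exact ⟨PySem.Dict.getD_insert_self _ _ _ _, PySem.Dict.getD_insert_self _ _ _ _⟩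

theorem altInner_self_neg (i : Int) (st : PySem.Dict Int Int × PySem.Dict Int Int)
    (kk : Int) (h : ¬ i > st.2.getD kk (-1)) : altInner i st kk = st := by
  rw [altInner, if_neg h]

theorem loop_main (ps : List (Int × Int)) :
    ∀ (j : Int) (cnt last : PySem.Dict Int Int),
    (∀ k, last.getD k (-1) ≤ j) →
    ∀ k, ((PySem.List.enumerate ps j).foldl altStep (cnt, last)).1.getD k 0
        = cnt.getD k 0 + f k ps (decide (j ≤ last.getD k (-1))) := by
  induction ps with
  | nil => intro j cnt last _ k; simp [PySem.List.enumerate, f]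
  | cons p rest ih =>
    obtain ⟨x, y⟩ := p
    intro j cnt last hle k
    rw [PySem.List.enumerate_cons, List.foldl_cons]
    by_cases hxy : x = y
    · rw [show altStep (cnt, last) (j, (x, y)) = (cnt, last) from by
        simp [altStep, hxy]]
      rw [ih (j + 1) cnt last (fun k' => (hle k').trans (by omega)) k]
      have hb : decide (j + 1 ≤ last.getD k (-1)) = false := by
        simp only [decide_eq_false_iff_not, not_le]; exact (hle k).trans_lt (by omega)
      rw [hb, f]
      have hcand : ¬ ((x = k ∨ y = k) ∧ x ≠ y) := fun hc => hc.2 hxy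
      cases hd : decide (j ≤ last.getD k (-1)) with
      | false => rw [if_neg (by simp), if_neg hcand]
      | true => rw [if_pos rfl]
    · rw [show altStep (cnt, last) (j, (x, y))
          = altInner j (altInner j (cnt, last) x) y from by
        simp [altStep, hxy]]
      set st1 := altInner j (cnt, last) x with hst1
      set st2 := altInner j st1 y with hst2
      have hst1le : ∀ k', st1.2.getD k' (-1) ≤ j + 1 := by
        intro k'
        rw [hst1, altInner]
        split
        · by_cases hk' : k' = x
          · subst hk'; rw [PySem.Dict.getD_insert_self]
          · rw [PySem.Dict.getD_insert_of_ne _ _ _ hk']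
            exact (hle k').trans (by omega)
        · exact (hle k').trans (by omega)
      have hst2le : ∀ k', st2.2.getD k' (-1) ≤ j + 1 := by
        intro k'
        rw [hst2, altInner]
        split
        · by_cases hk' : k' = y
          · subst hk'; rw [PySem.Dict.getD_insert_self]
          · rw [PySem.Dict.getD_insert_of_ne _ _ _ hk']
            exact hst1le k'
        · exact hst1le k'
      rw [show st2 = (st2.1, st2.2) from rfl, ih (j + 1) st2.1 st2.2 hst2le k]
      by_cases hkx : k = x
      · subst hkx
        obtain ⟨e1, e2⟩ := altInner_ne j st1 y k hxy
        rw [← hst2] at e1 e2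
        by_cases hbx : j > last.getD k (-1)
        · obtain ⟨d1, d2⟩ := altInner_self_pos j (cnt, last) k hbx
          rw [← hst1] at d1 d2
          rw [e1, e2, d1, d2]
          rw [show decide (j + 1 ≤ j + 1) = true from by simp]
          rw [show decide (j ≤ last.getD k (-1)) = false from by
            simp only [decide_eq_false_iff_not, not_le]; omega]
          rw [f, if_neg (by simp only [Bool.false_eq_true]; exact fun e => e.elim),
              if_pos ⟨Or.inl rfl, hxy⟩]
          ring
        · have hs1 : st1 = (cnt, last) := by
            rw [hst1]; exact altInner_self_neg j (cnt, last) k hbx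
          rw [e1, e2, hs1]
          rw [show decide (j + 1 ≤ last.getD k (-1)) = false from by
            simp only [decide_eq_false_iff_not, not_le]
            have := hle k; omega]
          rw [show decide (j ≤ last.getD k (-1)) = true from by
            simp only [decide_eq_true_eq]; omega]
          rw [f, if_pos rfl]
      · by_cases hky : k = y
        · subst hky
          obtain ⟨d1, d2⟩ := altInner_ne j (cnt, last) x k (fun e => hkx e)
          rw [← hst1] at d1 d2
          by_cases hby : j > last.getD k (-1)
          · have hby' : j > st1.2.getD k (-1) := by rw [d2]; exact hby
            obtain ⟨e1, e2⟩ := altInner_self_pos j st1 k hby'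
            rw [← hst2] at e1 e2
            rw [e1, e2, d1]
            rw [show decide (j + 1 ≤ j + 1) = true from by simp]
            rw [show decide (j ≤ last.getD k (-1)) = false from by
              simp only [decide_eq_false_iff_not, not_le]; omega]
            rw [f, if_neg (by simp only [Bool.false_eq_true]; exact fun e => e.elim),
                if_pos ⟨Or.inr rfl, hxy⟩]
            ring
          · have hby' : ¬ j > st1.2.getD k (-1) := by rw [d2]; exact hby
            have hs2 : st2 = st1 := by rw [hst2]; exact altInner_self_neg j st1 k hby'
            rw [hs2, d1, d2]
            rw [show decide (j + 1 ≤ last.getD k (-1)) = false from by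
              simp only [decide_eq_false_iff_not, not_le]
              have := hle k; omega]
            rw [show decide (j ≤ last.getD k (-1)) = true from by
              simp only [decide_eq_true_eq]; omega]
            rw [f, if_pos rfl]
        · obtain ⟨d1, d2⟩ := altInner_ne j (cnt, last) x k hkx
          rw [← hst1] at d1 d2
          obtain ⟨e1, e2⟩ := altInner_ne j st1 y k hky
          rw [← hst2] at e1 e2
          rw [e1, e2, d1, d2]
          rw [show decide (j + 1 ≤ last.getD k (-1)) = false from by
            simp only [decide_eq_false_iff_not, not_le]
            have := hle k; omega]
          have hcand : ¬ ((x = k ∨ y = k) ∧ x ≠ y) := by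
            rintro ⟨h1 | h2, -⟩
            · exact hkx h1.symm
            · exact hky h2.symm
          rw [f]
          cases hd : decide (j ≤ last.getD k (-1)) with
          | false => rw [if_neg (by simp only [Bool.false_eq_true]; exact fun e => e.elim), if_neg hcand]
          | true => rw [if_pos rfl]

theorem altInner_keys (i : Int) (st : PySem.Dict Int Int × PySem.Dict Int Int)
    (kk k : Int) (h : k ∈ (altInner i st kk).1.keys) : k = kk ∨ k ∈ st.1.keys := by
  rw [altInner] at h
  split at h
  · exact (PySem.Dict.mem_keys_insert _ _ _ _).1 h
  · exact Or.inr h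

theorem altStep_keys (st : PySem.Dict Int Int × PySem.Dict Int Int)
    (p : Int × (Int × Int)) (k : Int) (h : k ∈ (altStep st p).1.keys) :
    k = p.2.1 ∨ k = p.2.2 ∨ k ∈ st.1.keys := by
  rw [altStep] at h
  split at h
  · exact Or.inr (Or.inr h)
  · simp only [List.foldl_cons, List.foldl_nil] at h
    rcases altInner_keys _ _ _ _ h with h1 | h2
    · exact Or.inr (Or.inl h1)
    · rcases altInner_keys _ _ _ _ h2 with h3 | h4
      · exact Or.inl h3
      · exact Or.inr (Or.inr h4)

theorem loop_keys (l : List (Int × (Int × Int))) :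
    ∀ (st : PySem.Dict Int Int × PySem.Dict Int Int) (k : Int),
    k ∈ (l.foldl altStep st).1.keys → k ∈ st.1.keys ∨ ∃ p ∈ l, k = p.2.1 ∨ k = p.2.2 := by
  induction l with
  | nil => intro st k h; exact Or.inl h
  | cons q rest ih =>
    intro st k h
    rw [List.foldl_cons] at h
    rcases ih _ k h with h1 | ⟨p, hp, hk⟩
    · rcases altStep_keys _ _ _ h1 with h2 | h3 | h4
      · exact Or.inr ⟨q, by simp, Or.inl h2⟩
      · exact Or.inr ⟨q, by simp, Or.inr h3⟩
      · exact Or.inl h4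
    · exact Or.inr ⟨p, by simp [hp], hk⟩

theorem altInner_nodup (i : Int) (st : PySem.Dict Int Int × PySem.Dict Int Int)
    (kk : Int) (h : st.1.keys.Nodup) : (altInner i st kk).1.keys.Nodup := by
  rw [altInner]
  split
  · exact PySem.Dict.nodup_keys_insert _ _ _ h
  · exact h

theorem altStep_nodup (st : PySem.Dict Int Int × PySem.Dict Int Int)
    (p : Int × (Int × Int)) (h : st.1.keys.Nodup) : (altStep st p).1.keys.Nodup := by
  rw [altStep]
  split
  · exact h
  · simp only [List.foldl_cons, List.foldl_nil]
    exact altInner_nodup _ _ _ (altInner_nodup _ _ _ h)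

theorem loop_nodup (l : List (Int × (Int × Int))) :
    ∀ (st : PySem.Dict Int Int × PySem.Dict Int Int), st.1.keys.Nodup →
    (l.foldl altStep st).1.keys.Nodup := by
  induction l with
  | nil => intro st h; exact h
  | cons q rest ih => intro st h; exact ih _ (altStep_nodup _ _ h)

theorem solution_alt_eq (a : List Int) :
    solution_alt a = 2 * ((PySem.Set.ofList a : List Int).map (fun k => g k a)).foldl max 0 := by
  rw [solution_alt, PySem.List.slice_from_one]
  set st := List.foldl altStep (PySem.Dict.empty, PySem.Dict.empty)
    (PySem.List.enumerate (a.zip a.tail) 0) with hst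
  set L := (PySem.Set.ofList a : List Int).map (fun k => g k a) with hL
  have key : ∀ k, st.1.getD k 0 = g k a := by
    intro k
    rw [hst, loop_main (a.zip a.tail) 0 PySem.Dict.empty PySem.Dict.empty
      (fun k' => by rw [PySem.Dict.getD_empty]; omega) k]
    rw [PySem.Dict.getD_empty, PySem.Dict.getD_empty,
        show decide ((0 : Int) ≤ -1) = false from by decide, ← g_eq_f]
    omega
  have hnd : st.1.keys.Nodup := loop_nodup _ _ PySem.Dict.nodup_keys_empty
  have hkeys : ∀ k ∈ st.1.keys, k ∈ a := by
    intro k hk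
    rcases loop_keys _ _ k hk with h | ⟨p, hp, hkp⟩
    · rw [PySem.Dict.keys_empty] at h; cases h
    · have hz : p.2 ∈ a.zip a.tail := by
        have := PySem.List.map_snd_enumerate (a.zip a.tail) 0
        rw [← this]
        exact List.mem_map.2 ⟨p, hp, rfl⟩
      obtain ⟨h1, h2⟩ := List.of_mem_zip (l₁ := a) (l₂ := a.tail)
        (show (p.2.1, p.2.2) ∈ a.zip a.tail from by
          rw [show (p.2.1, p.2.2) = p.2 from rfl]; exact hz)
      rcases hkp with hk1 | hk2
      · exact hk1 ▸ h1
      · exact hk2 ▸ List.mem_of_mem_tail h2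
  have hsome : ∀ m, PySem.List.max? st.1.values (fun v => v) = some m →
      ∃ kk, kk ∈ a ∧ m = g kk a := by
    intro m hm
    have hmem : m ∈ st.1.items.map (·.2) := PySem.List.max?_mem hm
    obtain ⟨⟨kk, vv⟩, hit, hv⟩ := List.mem_map.1 hmem
    have hkmem : kk ∈ st.1.keys := PySem.Dict.mem_keys_of_mem_items _ hit
    have hgd : st.1.getD kk 0 = vv := PySem.Dict.getD_of_mem_items _ hit hnd 0
    exact ⟨kk, hkeys kk hkmem, by rw [← hv]; simp only []; rw [← hgd, key kk]⟩
  congr 1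
  apply le_antisymm
  · cases hm : PySem.List.max? st.1.values (fun v => v) with
    | none => exact (PySem.List.le_foldl_max L 0).1
    | some m =>
      obtain ⟨kk, hka, hmk⟩ := hsome m hm
      have hmemL : g kk a ∈ L := by
        rw [hL]
        exact List.mem_map.2 ⟨kk, (PySem.Set.mem_ofList a kk).2 hka, rfl⟩
      simpa [hmk] using (PySem.List.le_foldl_max L 0).2 _ hmemL
  · have hM2 : 0 ≤ (PySem.List.max? st.1.values (fun v => v)).getD 0 := by
      cases hm : PySem.List.max? st.1.values (fun v => v) with
      | none => simp
      | some m =>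
        obtain ⟨kk, _, hmk⟩ := hsome m hm
        simpa [hmk] using g_nonneg kk a
    rcases PySem.List.foldl_max_mem L 0 with h0 | hmem
    · rw [h0]; exact hM2
    · obtain ⟨kk, hkk, hgk⟩ := List.mem_map.1 hmem
      by_cases hpos : g kk a ≤ 0
      · rw [← hgk]
        have := g_nonneg kk a
        omega
      · have hgd : st.1.getD kk 0 = g kk a := key kk
        obtain ⟨v, hq⟩ : ∃ v, st.1.get? kk = some v := by
          cases hq : st.1.get? kk with
          | none =>
            exfalso
            have hz : st.1.getD kk 0 = 0 := by
              show (st.1.get? kk).getD 0 = 0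
              rw [hq]; rfl
            omega
          | some v => exact ⟨v, rfl⟩
        have hveq : v = g kk a := by
          have hv2 : st.1.getD kk 0 = v := by
            show (st.1.get? kk).getD 0 = v
            rw [hq]; rfl
          omega
        have hvmem : v ∈ st.1.values :=
          List.mem_map.2 ⟨(kk, v), PySem.Dict.mem_items_of_get?_eq_some _ hq, rfl⟩
        cases hm : PySem.List.max? st.1.values (fun v => v) with
        | none =>
          rw [PySem.List.max?_eq_none_iff] at hm
          rw [hm] at hvmem
          cases hvmem
        | some m =>
          have hle := PySem.List.max?_isMax hm v hvmem
          simp only [Option.getD_some]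
          rw [← hgk, ← hveq]
          exact hle

-- ===== VERDICT (by name: the statement is the Claim_ definition above) =====
theorem solution_spec : Claim_equal_solution := by
  intro a _
  unfold Spec_solution
  rw [solution_eq, solution_alt_eq]
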